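-- pv_equiv track=rewrite | github.com/5uperb0y/rosalind | code/sseq/sseq.py | find_spliced_motifs_rc
-- ===== SOURCE A (Python) =====
-- def find_spliced_motifs_rc(dna, motif):
--     """Finding all positions of a spliced motif in a DNA string using
--     recursion.
--
--     Args:
--         dna (str): A DNA string.
--         motif (str): A DNA motif to be found in the dna string.
--
--     Return:
--         list: A list of 1-based positions where the motif is found as
--               a subsequence in the DNA string.
--     """
--     def search(start, path, index):
--         if index == len(motif):
--             return {path}
--         else:
--             pass
--         results = set()
--         for i in range(start, len(dna)):
--             if dna[i] == motif[index]:
--                 results.update(search(i + 1, path + (i + 1, ), index + 1))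
--             else:
--                 pass
--         return results
--     return search(0, (), 0)
-- ===== SOURCE B (Python) =====
-- def find_spliced_motifs_rc(dna, motif):
--     """Iterative level-by-level (BFS frontier) enumeration of all 1-based
--     position tuples where motif occurs as a subsequence of dna."""
--     paths = {()}
--     for index in range(len(motif)):
--         nxt = set()
--         for path in paths:
--             start = path[-1] if path else 0
--             for i in range(start, len(dna)):
--                 if dna[i] == motif[index]:
--                     nxt.add(path + (i + 1,))
--         paths = nxt
--     return paths
-- ===== Notes on version B (the rewrite author's own statement) =====
-- stated objective: alternative
-- what changed: Replaces A's depth-first recursive search (recursing on the motif index and unioning result sets) with an iterative breadth-first frontier: a set of partial position tuples is extended level by level, one motif character per pass.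
import Mathlib
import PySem

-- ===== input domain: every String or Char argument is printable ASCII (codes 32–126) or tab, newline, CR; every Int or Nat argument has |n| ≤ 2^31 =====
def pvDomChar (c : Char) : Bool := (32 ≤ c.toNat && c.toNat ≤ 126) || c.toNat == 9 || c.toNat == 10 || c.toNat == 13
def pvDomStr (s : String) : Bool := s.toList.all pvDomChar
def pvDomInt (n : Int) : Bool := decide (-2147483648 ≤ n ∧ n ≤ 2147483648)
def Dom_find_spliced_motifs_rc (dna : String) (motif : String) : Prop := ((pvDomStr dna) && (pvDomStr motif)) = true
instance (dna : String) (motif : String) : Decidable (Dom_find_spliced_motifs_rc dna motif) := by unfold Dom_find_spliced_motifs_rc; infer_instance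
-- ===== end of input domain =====

-- B replaces A's depth-first recursion by an iterative level-by-level (frontier) construction
-- of the same set of position tuples; objective: alternative decomposition, similar cost.


-- ===== PORT A =====
-- search(start, path, index) from Source A.  'index == len(motif)' is written 'M.length ≤ index'
-- (index never exceeds len(motif), so they agree; the ≤ form gives termination).
-- range(start, len(dna)) is List.range' start (n - start) (exact, also when start ≥ n);
-- every index i read is in range, so dna[i] is D.getD i ' ' (the default is never used).
def pvSearchA (D M : List Char) (start : Nat) (path : List Int) (index : Nat) : List (List Int) :=
  if _h : M.length ≤ index then PySem.Set.ofList [path]   -- return {path}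
  else
    (List.range' start (D.length - start)).foldl
      (fun results i =>
        if D.getD i ' ' == M.getD index ' ' then
          PySem.Set.update results (pvSearchA D M (i+1) (path ++ [(i : Int) + 1]) (index+1))
        else results)
      PySem.Set.empty
termination_by M.length - index
decreasing_by omega

def find_spliced_motifs_rc (dna : String) (motif : String) : List (List Int) :=
  pvSearchA dna.toList motif.toList 0 [] 0

-- ===== PORT B =====
-- one pass of Source B's outer loop body: from the frontier 'paths' build the next frontier for motif char c
def pvStepB (D : List Char) (c : Char) (paths : List (List Int)) : List (List Int) :=
  paths.foldl
    (fun nxt path =>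
      -- start = path[-1] if path else 0  (positions are ≥ 1, so .toNat is exact)
      let start : Nat := (path.getLast?.getD 0).toNat
      (List.range' start (D.length - start)).foldl
        (fun nxt i =>
          if D.getD i ' ' == c then PySem.Set.add nxt (path ++ [(i : Int) + 1]) else nxt)
        nxt)
    PySem.Set.empty

-- 'for index in range(len(motif)): … motif[index] …' is a fold over motif's characters
def find_spliced_motifs_rc_alt (dna : String) (motif : String) : List (List Int) :=
  motif.toList.foldl (fun paths c => pvStepB dna.toList c paths) (PySem.Set.ofList [[]])

-- ===== PRECONDITION & SPEC =====
def Spec_find_spliced_motifs_rc (dna : String) (motif : String) (out : List (List Int)) : Prop := out = find_spliced_motifs_rc_alt dna motif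
instance (dna : String) (motif : String) (out : List (List Int)) : Decidable (Spec_find_spliced_motifs_rc dna motif out) := by unfold Spec_find_spliced_motifs_rc; infer_instance

-- ===== CLAIM (what is proved, stated in full; the proofs are below) =====
def Claim_equal_find_spliced_motifs_rc : Prop := ∀ (dna : String) (motif : String), Dom_find_spliced_motifs_rc dna motif → Spec_find_spliced_motifs_rc dna motif (find_spliced_motifs_rc dna motif)

-- ===== LEMMAS AND PROOFS =====

-- the indices i of range(start, len(dna)) with dna[i] == c
def pvMatches (D : List Char) (c : Char) (s : Nat) : List Nat :=
  (List.range' s (D.length - s)).filter (fun i => D.getD i ' ' == c)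

-- reference enumeration: all embeddings (as 1-based position lists) of motif[index:]
-- into dna at 0-based positions ≥ s, in lexicographic order, duplicate-free
def pvEmb (D M : List Char) (index : Nat) (s : Nat) : List (List Int) :=
  if _h : M.length ≤ index then [[]]
  else (pvMatches D (M.getD index ' ') s).flatMap
        (fun i => (pvEmb D M (index+1) (i+1)).map (fun e => ((i : Int)+1) :: e))
termination_by M.length - index
decreasing_by omega

theorem pvNodup_flatMap_of_disjoint {α β : Type} (l : List α) (f : α → List β)
    (hl : l.Nodup) (hf : ∀ a ∈ l, (f a).Nodup)
    (hd : ∀ a ∈ l, ∀ b ∈ l, a ≠ b → ∀ x ∈ f a, x ∉ f b) :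
    (l.flatMap f).Nodup := by
  induction l with
  | nil => simp
  | cons a l ih =>
    rw [List.flatMap_cons, List.nodup_append]
    refine ⟨hf a (by simp), ih hl.of_cons (fun b hb => hf b (by simp [hb]))
      (fun b hb c hc hbc => hd b (by simp [hb]) c (by simp [hc]) hbc), ?_⟩
    intro x hx y hy hxy
    obtain ⟨b, hb, hyb⟩ := List.mem_flatMap.mp hy
    subst hxy
    exact hd a (by simp) b (by simp [hb])
      (fun h' => (List.nodup_cons.mp hl).1 (h' ▸ hb)) x hx hyb

theorem pvNodup_matches (D : List Char) (c : Char) (s : Nat) : (pvMatches D c s).Nodup :=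
  List.Nodup.filter _ (List.nodup_range' 1)

theorem pvNodup_emb (D M : List Char) (index s : Nat) : (pvEmb D M index s).Nodup := by
  by_cases h : M.length ≤ index
  · rw [pvEmb, dif_pos h]; simp
  · rw [pvEmb, dif_neg h]
    apply pvNodup_flatMap_of_disjoint
    · exact pvNodup_matches D _ s
    · intro i _
      exact List.Nodup.map (fun a b hab => by injection hab)
        (pvNodup_emb D M (index+1) (i+1))
    · intro i _ j _ hij x hx hx'
      obtain ⟨e, _, rfl⟩ := List.mem_map.mp hx
      obtain ⟨e', _, he'⟩ := List.mem_map.mp hx'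
      have : ((j : Int)+1) = ((i : Int)+1) := by injection he'
      exact hij (by omega)
termination_by M.length - index
decreasing_by omega

-- a fold of conditional 'Set.update's collapses to plain concatenation when the result has no duplicates
theorem pvFoldl_update_acc {α : Type} [BEq α] [LawfulBEq α] (l : List Nat) (P : Nat → Bool)
    (g : Nat → List α) :
    ∀ acc : List α, (acc ++ (l.filter P).flatMap g).Nodup →
      l.foldl (fun res i => if P i then PySem.Set.update res (g i) else res) acc
        = acc ++ (l.filter P).flatMap g := by
  induction l with
  | nil => intro acc _; simp
  | cons x l ih =>
    intro acc h
    by_cases hx : P x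
    · rw [List.filter_cons_of_pos hx] at h ⊢
      rw [List.flatMap_cons] at h ⊢
      rw [← List.append_assoc] at h ⊢
      have hsub : (acc ++ g x).Nodup := List.Nodup.of_append_left h
      have hupd : PySem.Set.update acc (g x) = acc ++ g x := by
        apply PySem.Set.update_eq_append_of_disjoint
        · exact (List.nodup_append.mp hsub).2.1
        · intro y hy hy'
          exact (List.nodup_append.mp hsub).2.2 y hy' y hy rfl
      simp only [List.foldl_cons, hx, if_true]
      rw [hupd]
      exact ih (acc ++ g x) h
    · rw [List.filter_cons_of_neg (by simpa using hx)] at h ⊢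
      simp only [List.foldl_cons, hx, Bool.false_eq_true, if_false]
      exact ih acc h

-- a fold of conditional 'Set.add's collapses to plain concatenation when the result has no duplicates
theorem pvFoldl_add_acc {α : Type} [BEq α] [LawfulBEq α] (l : List Nat) (P : Nat → Bool)
    (g : Nat → α) :
    ∀ acc : List α, (acc ++ (l.filter P).map g).Nodup →
      l.foldl (fun a i => if P i then PySem.Set.add a (g i) else a) acc
        = acc ++ (l.filter P).map g := by
  induction l with
  | nil => intro acc _; simp
  | cons x l ih =>
    intro acc h
    by_cases hx : P x
    · rw [List.filter_cons_of_pos hx] at h ⊢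
      rw [List.map_cons] at h ⊢
      have h' : ((acc ++ [g x]) ++ (l.filter P).map g).Nodup := by
        simpa [List.append_assoc] using h
      have hsub : (acc ++ [g x]).Nodup := List.Nodup.of_append_left h'
      have hadd : PySem.Set.add acc (g x) = acc ++ [g x] := by
        apply PySem.Set.add_of_not_mem
        intro hy
        exact (List.nodup_append.mp hsub).2.2 (g x) hy (g x) (by simp) rfl
      simp only [List.foldl_cons, hx, if_true]
      rw [hadd, ih (acc ++ [g x]) h', List.append_assoc]
      simp
    · rw [List.filter_cons_of_neg (by simpa using hx)] at h ⊢
      simp only [List.foldl_cons, hx, Bool.false_eq_true, if_false]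
      exact ih acc h

-- unfolding pvEmb under a prefix map
theorem pvEmb_map (D M : List Char) (k s : Nat) (p : List Int) (h : ¬ M.length ≤ k) :
    (pvEmb D M k s).map (fun e => p ++ e)
      = (pvMatches D (M.getD k ' ') s).flatMap
          (fun i => (pvEmb D M (k+1) (i+1)).map (fun e => (p ++ [(i : Int)+1]) ++ e)) := by
  rw [pvEmb, dif_neg h, List.map_flatMap]
  have hfun : ∀ i : Nat,
      ((pvEmb D M (k+1) (i+1)).map (fun e => ((i : Int)+1) :: e)).map (fun e => p ++ e)
        = (pvEmb D M (k+1) (i+1)).map (fun e => (p ++ [(i : Int)+1]) ++ e) := by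
    intro i
    rw [List.map_map]
    congr 1
    funext e
    simp
  simp only [hfun]

-- A's DFS search is the reference enumeration, prefixed with the current path
theorem pvSearchA_eq (D M : List Char) (s : Nat) (p : List Int) (k : Nat) :
    pvSearchA D M s p k = (pvEmb D M k s).map (fun e => p ++ e) := by
  by_cases h : M.length ≤ k
  · rw [pvSearchA, dif_pos h, pvEmb, dif_pos h]
    rw [PySem.Set.ofList_eq_self_of_nodup _ (by simp)]
    simp
  · rw [pvSearchA, dif_neg h]
    have hrec : ∀ i : Nat, pvSearchA D M (i+1) (p ++ [(i:Int)+1]) (k+1)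
        = (pvEmb D M (k+1) (i+1)).map (fun e => (p ++ [(i:Int)+1]) ++ e) :=
      fun i => pvSearchA_eq D M (i+1) (p ++ [(i:Int)+1]) (k+1)
    simp only [hrec]
    have hmap : (PySem.Set.empty : List (List Int)) ++
          (pvMatches D (M.getD k ' ') s).flatMap
            (fun i => (pvEmb D M (k+1) (i+1)).map (fun e => (p ++ [(i:Int)+1]) ++ e))
        = (pvEmb D M k s).map (fun e => p ++ e) := by
      rw [← pvEmb_map D M k s p h]
      rfl
    have hnd : ((PySem.Set.empty : List (List Int)) ++
        (pvMatches D (M.getD k ' ') s).flatMap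
          (fun i => (pvEmb D M (k+1) (i+1)).map (fun e => (p ++ [(i:Int)+1]) ++ e))).Nodup := by
      rw [hmap]
      exact List.Nodup.map (fun a b hab => List.append_cancel_left hab) (pvNodup_emb D M k s)
    exact (pvFoldl_update_acc (List.range' s (D.length - s))
        (fun i => D.getD i ' ' == M.getD k ' ')
        (fun i => (pvEmb D M (k+1) (i+1)).map (fun e => (p ++ [(i:Int)+1]) ++ e))
        PySem.Set.empty hnd).trans hmap
termination_by M.length - k
decreasing_by omega

-- one ideal (duplicate-free) frontier step
def pvStepI (D : List Char) (paths : List (List Int)) (c : Char) : List (List Int) :=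
  paths.flatMap (fun p =>
    (pvMatches D c ((p.getLast?.getD 0).toNat)).map (fun i : Nat => p ++ [(i : Int)+1]))

theorem pvStepI_len (D : List Char) (c : Char) (paths : List (List Int)) (len : Nat)
    (hlen : ∀ p ∈ paths, p.length = len) :
    ∀ q ∈ pvStepI D paths c, q.length = len + 1 := by
  intro q hq
  obtain ⟨p, hp, hq2⟩ := List.mem_flatMap.mp hq
  obtain ⟨i, _, rfl⟩ := List.mem_map.mp hq2
  simp [hlen p hp]

theorem pvStepI_nodup (D : List Char) (c : Char) (paths : List (List Int)) (len : Nat)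
    (hnd : paths.Nodup) (hlen : ∀ p ∈ paths, p.length = len) :
    (pvStepI D paths c).Nodup := by
  apply pvNodup_flatMap_of_disjoint _ _ hnd
  · intro p _
    apply List.Nodup.map ?_ (pvNodup_matches D c _)
    intro a b hab
    have : ((a : Int)+1) = ((b : Int)+1) := by
      have := List.append_cancel_left hab
      injection this
    omega
  · intro p hp p' hp' hne x hx hx'
    obtain ⟨i, _, rfl⟩ := List.mem_map.mp hx
    obtain ⟨j, _, hj⟩ := List.mem_map.mp hx'
    have hl : p'.length = p.length := by rw [hlen p hp, hlen p' hp']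
    exact hne ((List.append_inj hj hl).1.symm ▸ rfl)

-- B's fold step (with Set.add deduplication) equals the ideal step when the result has no duplicates
theorem pvStepB_eq (D : List Char) (c : Char) (paths : List (List Int))
    (h : (pvStepI D paths c).Nodup) : pvStepB D c paths = pvStepI D paths c := by
  suffices H : ∀ (ps : List (List Int)) (acc : List (List Int)), (acc ++ pvStepI D ps c).Nodup →
      ps.foldl
        (fun nxt path =>
          let start : Nat := (path.getLast?.getD 0).toNat
          (List.range' start (D.length - start)).foldl
            (fun nxt i =>
              if D.getD i ' ' == c then PySem.Set.add nxt (path ++ [(i : Int) + 1]) else nxt)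
            nxt)
        acc = acc ++ pvStepI D ps c by
    have := H paths PySem.Set.empty (by simpa using h)
    simpa [pvStepB] using this
  intro ps
  induction ps with
  | nil => intro acc _; simp [pvStepI]
  | cons p ps ih =>
    intro acc h
    have hsplit : pvStepI D (p :: ps) c
        = (pvMatches D c ((p.getLast?.getD 0).toNat)).map (fun i : Nat => p ++ [(i : Int)+1])
          ++ pvStepI D ps c := by
      simp only [pvStepI, List.flatMap_cons]
    rw [hsplit] at h ⊢
    rw [← List.append_assoc] at h ⊢
    rw [List.foldl_cons]
    have h1 : List.foldl
          (fun nxt i => if D.getD i ' ' == c then PySem.Set.add nxt (p ++ [(i : Int) + 1]) else nxt)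
          acc (List.range' ((p.getLast?.getD 0).toNat) (D.length - (p.getLast?.getD 0).toNat))
        = acc ++ (pvMatches D c ((p.getLast?.getD 0).toNat)).map (fun i : Nat => p ++ [(i : Int)+1]) :=
      pvFoldl_add_acc (List.range' ((p.getLast?.getD 0).toNat) (D.length - (p.getLast?.getD 0).toNat))
        (fun i => D.getD i ' ' == c) (fun i : Nat => p ++ [(i : Int)+1]) acc
        (List.Nodup.of_append_left h)
    rw [h1]
    exact ih _ h

-- running the ideal step over the remaining motif = reference enumeration glued onto each frontier path
theorem pvFoldI (D M : List Char) (k : Nat) (paths : List (List Int)) :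
    (M.drop k).foldl (fun ps c => pvStepI D ps c) paths
      = paths.flatMap (fun p => (pvEmb D M k ((p.getLast?.getD 0).toNat)).map (fun e => p ++ e)) := by
  by_cases h : M.length ≤ k
  · rw [List.drop_eq_nil_of_le h]
    have hemb : ∀ s, pvEmb D M k s = [[]] := fun s => by rw [pvEmb, dif_pos h]
    simp only [List.foldl_nil, hemb, List.map_cons, List.map_nil, List.append_nil]
    simp
  · have hk : k < M.length := by omega
    rw [List.drop_eq_getElem_cons hk, List.foldl_cons]
    rw [pvFoldI D M (k+1) (pvStepI D paths M[k])]
    have hgc : M[k] = M.getD k ' ' := (List.getD_eq_getElem M ' ' hk).symm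
    rw [pvStepI, List.flatMap_assoc]
    have hpt : ∀ p : List Int,
        ((pvMatches D M[k] ((p.getLast?.getD 0).toNat)).map (fun i : Nat => p ++ [(i : Int)+1])).flatMap
            (fun q => (pvEmb D M (k+1) ((q.getLast?.getD 0).toNat)).map (fun e => q ++ e))
          = (pvEmb D M k ((p.getLast?.getD 0).toNat)).map (fun e => p ++ e) := by
      intro p
      rw [List.flatMap_map]
      have hlast : ∀ i : Nat, (((p ++ [(i : Int)+1]).getLast?.getD 0).toNat) = i + 1 := by
        intro i
        rw [List.getLast?_concat]
        show ((i : Int)+1).toNat = i + 1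
        omega
      simp only [hlast]
      rw [pvEmb_map D M k _ p h, hgc]
    simp only [hpt]
termination_by M.length - k
decreasing_by omega

theorem pvFoldB_eq_foldI (D : List Char) :
    ∀ (M : List Char) (paths : List (List Int)) (len : Nat), paths.Nodup →
      (∀ p ∈ paths, p.length = len) →
      M.foldl (fun ps c => pvStepB D c ps) paths = M.foldl (fun ps c => pvStepI D ps c) paths := by
  intro M
  induction M with
  | nil => intro paths len _ _; rfl
  | cons c M ih =>
    intro paths len hnd hlen
    rw [List.foldl_cons, List.foldl_cons]
    have hnd' := pvStepI_nodup D c paths len hnd hlen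
    rw [pvStepB_eq D c paths hnd']
    exact ih (pvStepI D paths c) (len+1) hnd' (pvStepI_len D c paths len hlen)

-- ===== VERDICT (by name: the statement is the Claim_ definition above) =====
theorem find_spliced_motifs_rc_spec : Claim_equal_find_spliced_motifs_rc := by
  intro dna motif _hdom
  unfold Spec_find_spliced_motifs_rc find_spliced_motifs_rc find_spliced_motifs_rc_alt
  rw [pvSearchA_eq]
  have h0 : PySem.Set.ofList [([] : List Int)] = [[]] :=
    PySem.Set.ofList_eq_self_of_nodup _ (by simp)
  rw [h0]
  rw [pvFoldB_eq_foldI dna.toList motif.toList [[]] 0 (by simp) (by simp)]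
  have hF := pvFoldI dna.toList motif.toList 0 [[]]
  rw [List.drop_zero] at hF
  rw [hF]
  simp
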